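-- pv_equiv track=rewrite | github.com/miavox/RAG-Cosmetic | src/utils.py | generate_query_texts_fields_with_brand_check
-- ===== SOURCE A (Python) =====
-- def generate_query_texts_fields_with_brand_check(query):
--     special_fields = ["ingredients", "instructions", "description", "name", "comments"]
--     special_requirements = query.get("special_requirements", {})
--     brand_count = len(special_requirements.get("brand", []))
--
--     if brand_count == 0:
--         return []  # Không có thương hiệu nào, trả về danh sách rỗng
--
--     # Tạo danh sách các giá trị cho từng trường, đảm bảo giá trị hợp lệ được duplicate
--     values_list = [
--         (
--             [
--                 value if value is not None else next(
--                     (v for v in special_requirements.get(field, []) if v is not None),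
--                     None
--                 )
--                 for value in (special_requirements.get(field, []) or [None])
--             ]
--             if special_requirements.get(field, [])
--             else [None] * brand_count
--         )
--         for field in special_fields
--     ]
--
--     # Ensure every group corresponds to each brand
--     query_texts_fields = []
--     for i in range(brand_count):
--         group = [
--             (values_list[j][i], special_fields[j])
--             for j in range(len(special_fields))
--             if values_list[j][i] is not None
--         ]
--         query_texts_fields.append(group)
--
--     # Nếu tất cả các nhóm đều rỗng, tạo danh sách mặc định
--     if all(not group for group in query_texts_fields):
--         query_texts_fields = [[('Thành phần', 'description')] for _ in range(brand_count)]
--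
--     return query_texts_fields
-- ===== SOURCE B (Python) =====
-- def generate_query_texts_fields_with_brand_check(query):
--     special_fields = ["ingredients", "instructions", "description", "name", "comments"]
--     special_requirements = query.get("special_requirements", {})
--     brand_count = len(special_requirements.get("brand", []))
--     if brand_count == 0:
--         return []
--     # Column-major accumulation: start with one empty group per brand and fold each
--     # field's contribution into all groups at once (no values_list table, no transpose).
--     groups = [[] for _ in range(brand_count)]
--     for field in special_fields:
--         lst = special_requirements.get(field, [])
--         if not lst:
--             continue
--         fallback = next((v for v in lst if v is not None), None)
--         for i in range(brand_count):
--             val = lst[i]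
--             if val is None:
--                 val = fallback
--             if val is not None:
--                 groups[i].append((val, field))
--     if all(not g for g in groups):
--         groups = [[('Thành phần', 'description')] for _ in range(brand_count)]
--     return groups
-- ===== Notes on version B (the rewrite author's own statement) =====
-- stated objective: alternative
-- what changed: Replaced A's two-phase build-the-values_list-table-then-transpose with a column-major accumulation: start with one empty group per brand and fold each field's contribution into all groups, eliminating the intermediate table and the index-based transpose.
import Mathlib
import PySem

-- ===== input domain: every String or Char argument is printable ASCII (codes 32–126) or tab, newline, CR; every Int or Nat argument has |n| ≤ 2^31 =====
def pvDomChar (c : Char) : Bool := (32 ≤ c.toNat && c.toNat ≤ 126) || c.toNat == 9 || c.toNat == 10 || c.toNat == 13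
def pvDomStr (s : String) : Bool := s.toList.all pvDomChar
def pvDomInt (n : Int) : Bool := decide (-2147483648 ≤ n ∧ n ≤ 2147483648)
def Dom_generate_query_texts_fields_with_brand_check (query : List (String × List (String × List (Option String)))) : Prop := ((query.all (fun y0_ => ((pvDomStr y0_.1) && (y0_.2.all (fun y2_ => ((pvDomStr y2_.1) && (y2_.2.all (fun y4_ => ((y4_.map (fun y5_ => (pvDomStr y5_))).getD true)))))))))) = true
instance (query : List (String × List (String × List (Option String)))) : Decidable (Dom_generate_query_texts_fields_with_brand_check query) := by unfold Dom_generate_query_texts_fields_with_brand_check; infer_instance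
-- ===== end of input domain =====

-- B replaces A's build-values_list-table-then-transpose two-phase shape with a column-major
-- accumulation (one empty group per brand, fold every field's contribution into all groups);
-- objective: alternative decomposition. Return-value equivalence only; neither mutates.

def pvSpecialFields : List String := ["ingredients", "instructions", "description", "name", "comments"]

-- ===== PORT A =====
def generate_query_texts_fields_with_brand_check (query : List (String × List (String × List (Option String)))) : List (List (String × String)) :=
  let special_fields := pvSpecialFields
  let special_requirements := PySem.Dict.getD (PySem.Dict.mk query) "special_requirements" []
  let brand_count := (PySem.Dict.getD (PySem.Dict.mk special_requirements) "brand" []).length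
  if brand_count = 0 then []
  else
    let values_list : List (List (Option String)) :=
      special_fields.map (fun field =>
        let lst := PySem.Dict.getD (PySem.Dict.mk special_requirements) field []
        if lst ≠ [] then
          lst.map (fun value =>
            if Option.isSome value then value
            else (lst.find? (fun v => Option.isSome v)).getD none)
        else List.replicate brand_count none)
    let query_texts_fields :=
      (PySem.List.pyRange 0 (brand_count : Int) 1).map (fun i =>
        (PySem.List.pyRange 0 (special_fields.length : Int) 1).filterMap (fun j =>
          match (PySem.List.pyGet? ((PySem.List.pyGet? values_list j).getD []) i).getD none with
          | some s => some (s, (PySem.List.pyGet? special_fields j).getD "")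
          | none => none))
    if query_texts_fields.all (fun g => g = []) then
      (PySem.List.pyRange 0 (brand_count : Int) 1).map (fun _ => [("Thành phần", "description")])
    else query_texts_fields

-- ===== PORT B =====
-- one field's pass over all the groups (Python's inner 'for i in range(brand_count)' loop,
-- which appends to groups[i] in index order, rendered as a map over the indexed groups)
def pvFieldStep (sr : List (String × List (Option String))) (groups : List (List (String × String))) (field : String) : List (List (String × String)) :=
  let lst := PySem.Dict.getD (PySem.Dict.mk sr) field []
  if lst = [] then groups
  else
    let fallback := (lst.find? (fun v => Option.isSome v)).getD none
    groups.zipIdx.map (fun gi =>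
      let val := (PySem.List.pyGet? lst (gi.2 : Int)).getD none
      let val := if Option.isSome val then val else fallback
      match val with
      | some s => gi.1 ++ [(s, field)]
      | none => gi.1)

def generate_query_texts_fields_with_brand_check_alt (query : List (String × List (String × List (Option String)))) : List (List (String × String)) :=
  let special_requirements := PySem.Dict.getD (PySem.Dict.mk query) "special_requirements" []
  let brand_count := (PySem.Dict.getD (PySem.Dict.mk special_requirements) "brand" []).length
  if brand_count = 0 then []
  else
    let groups := pvSpecialFields.foldl (pvFieldStep special_requirements) (List.replicate brand_count [])
    if groups.all (fun g => g = []) then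
      List.replicate brand_count [("Thành phần", "description")]
    else groups

-- ===== PRECONDITION & SPEC =====
-- Pre_ excludes exactly the inputs where Python A raises IndexError: a special field whose
-- list is non-empty but shorter than the brand list (both A and B raise there).
def Pre_generate_query_texts_fields_with_brand_check (query : List (String × List (String × List (Option String)))) : Prop :=
  ∀ field ∈ pvSpecialFields,
    (PySem.Dict.getD (PySem.Dict.mk (PySem.Dict.getD (PySem.Dict.mk query) "special_requirements" [])) field []) ≠ [] →
    (PySem.Dict.getD (PySem.Dict.mk (PySem.Dict.getD (PySem.Dict.mk query) "special_requirements" [])) "brand" []).length ≤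
      (PySem.Dict.getD (PySem.Dict.mk (PySem.Dict.getD (PySem.Dict.mk query) "special_requirements" [])) field []).length

instance (query : List (String × List (String × List (Option String)))) : Decidable (Pre_generate_query_texts_fields_with_brand_check query) := by unfold Pre_generate_query_texts_fields_with_brand_check; infer_instance

def pvWitness_generate_query_texts_fields_with_brand_check : (List (String × List (String × List (Option String)))) :=
  [("special_requirements", [("brand", [some "A", some "B"]), ("name", [some "X", none])])]

def Spec_generate_query_texts_fields_with_brand_check (query : List (String × List (String × List (Option String)))) (out : List (List (String × String))) : Prop := out = generate_query_texts_fields_with_brand_check_alt query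
instance (query : List (String × List (String × List (Option String)))) (out : List (List (String × String))) : Decidable (Spec_generate_query_texts_fields_with_brand_check query out) := by unfold Spec_generate_query_texts_fields_with_brand_check; infer_instance

-- ===== CLAIM (what is proved, stated in full; the proofs are below) =====
def Claim_equal_generate_query_texts_fields_with_brand_check : Prop := ∀ (query : List (String × List (String × List (Option String)))), Dom_generate_query_texts_fields_with_brand_check query → Pre_generate_query_texts_fields_with_brand_check query → Spec_generate_query_texts_fields_with_brand_check query (generate_query_texts_fields_with_brand_check query)

-- ===== LEMMAS AND PROOFS =====

-- B's per-(field, brand) contribution, extracted for the proofs (not used by the ports)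
def pvEntry (sr : List (String × List (Option String))) (field : String) (k : Nat) : Option (String × String) :=
  let lst := PySem.Dict.getD (PySem.Dict.mk sr) field []
  if lst = [] then none
  else
    let val := (PySem.List.pyGet? lst (k : Int)).getD none
    let val := if Option.isSome val then val else (lst.find? (fun v => Option.isSome v)).getD none
    match val with
    | some s => some (s, field)
    | none => none

lemma pvFieldStep_get? (sr : List (String × List (Option String))) (groups : List (List (String × String))) (field : String) (k : Nat) :
    (pvFieldStep sr groups field)[k]? = groups[k]?.map (fun g => g ++ (pvEntry sr field k).toList) := by
  unfold pvFieldStep pvEntry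
  by_cases h : PySem.Dict.getD (PySem.Dict.mk sr) field [] = []
  · simp [h]
  · rw [if_neg h]
    simp only [h, List.getElem?_map, List.getElem?_zipIdx, PySem.List.pyGet?_natCast]
    cases hg : groups[k]? with
    | none => simp
    | some g =>
      simp only [Option.map_some]
      cases hv : (if Option.isSome (((PySem.Dict.getD (PySem.Dict.mk sr) field [])[k]?).getD none)
          then ((PySem.Dict.getD (PySem.Dict.mk sr) field [])[k]?).getD none
          else ((PySem.Dict.getD (PySem.Dict.mk sr) field []).find? (fun v => Option.isSome v)).getD none) with
      | none => simp [hv]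
      | some s => simp [hv]

lemma pvFold_get? (sr : List (String × List (Option String))) (fields : List String) :
    ∀ (groups : List (List (String × String))) (k : Nat),
    (fields.foldl (pvFieldStep sr) groups)[k]? = groups[k]?.map (fun g => g ++ fields.filterMap (fun f => pvEntry sr f k)) := by
  induction fields with
  | nil => intro groups k; cases h : groups[k]? <;> simp [h]
  | cons field rest ih =>
    intro groups k
    simp only [List.foldl_cons, ih, pvFieldStep_get?]
    cases h : groups[k]? with
    | none => simp
    | some g =>
      simp only [Option.map]
      rw [List.filterMap_cons]
      cases he : pvEntry sr field k <;> simp [List.append_assoc]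

-- A's per-(field, brand) entry agrees with B's.
lemma pv_entry_eq (lst : List (Option String)) (bc : Nat) (k : Nat) (field : String)
    (hib : k < bc) (hlen : lst ≠ [] → bc ≤ lst.length) :
    (match (PySem.List.pyGet?
        (if lst ≠ [] then
          lst.map (fun value => if Option.isSome value then value else (lst.find? (fun v => Option.isSome v)).getD none)
        else List.replicate bc none) (k : Int)).getD none with
     | some s => some (s, field)
     | none => (none : Option (String × String)))
    = (if lst = [] then none
       else
         let val := (PySem.List.pyGet? lst (k : Int)).getD none
         let val := if Option.isSome val then val else (lst.find? (fun v => Option.isSome v)).getD none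
         match val with
         | some s => some (s, field)
         | none => none) := by
  by_cases h : lst = []
  · subst h
    have hrep : PySem.List.pyGet? (List.replicate bc (none : Option String)) (k : Int) = some none := by
      rw [PySem.List.pyGet?_of_nonneg _ (by positivity)]
      rw [List.getElem?_replicate]
      simp; omega
    simp [hrep]
  · have hbc : bc ≤ lst.length := hlen h
    have hti : ((k : Int)).toNat < lst.length := by omega
    rw [if_pos h, if_neg h, PySem.List.pyGet?_of_nonneg _ (by positivity), PySem.List.pyGet?_of_nonneg _ (by positivity)]
    rw [List.getElem?_map, List.getElem?_eq_getElem hti]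
    simp

-- A's row (brand k's group) equals B's filterMap over the fields.
lemma pv_row_eq (sr : List (String × List (Option String))) (bc : Nat) (k : Nat)
    (hib : k < bc)
    (hpre : ∀ field ∈ pvSpecialFields, PySem.Dict.getD (PySem.Dict.mk sr) field [] ≠ [] → bc ≤ (PySem.Dict.getD (PySem.Dict.mk sr) field []).length) :
    (PySem.List.pyRange 0 ((pvSpecialFields.length : Int)) 1).filterMap (fun j =>
        match (PySem.List.pyGet? ((PySem.List.pyGet? (pvSpecialFields.map (fun field =>
            let lst := PySem.Dict.getD (PySem.Dict.mk sr) field []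
            if lst ≠ [] then lst.map (fun value => if Option.isSome value then value else (lst.find? (fun v => Option.isSome v)).getD none)
            else List.replicate bc none)) j).getD []) (k : Int)).getD none with
        | some s => some (s, (PySem.List.pyGet? pvSpecialFields j).getD "")
        | none => none)
    = pvSpecialFields.filterMap (fun field => pvEntry sr field k) := by
  have hr : PySem.List.pyRange 0 ((pvSpecialFields.length : Int)) 1 = [0,1,2,3,4] := by decide
  have hf : pvSpecialFields = [(0:Int),1,2,3,4].map (fun j => (PySem.List.pyGet? pvSpecialFields j).getD "") := by decide
  rw [hr]
  conv_rhs => rw [hf]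
  rw [List.filterMap_map]
  apply List.filterMap_congr
  intro j hj
  unfold pvEntry
  fin_cases hj
  · exact pv_entry_eq (PySem.Dict.getD (PySem.Dict.mk sr) "ingredients" []) bc k "ingredients" hib (hpre "ingredients" (by decide))
  · exact pv_entry_eq (PySem.Dict.getD (PySem.Dict.mk sr) "instructions" []) bc k "instructions" hib (hpre "instructions" (by decide))
  · exact pv_entry_eq (PySem.Dict.getD (PySem.Dict.mk sr) "description" []) bc k "description" hib (hpre "description" (by decide))
  · exact pv_entry_eq (PySem.Dict.getD (PySem.Dict.mk sr) "name" []) bc k "name" hib (hpre "name" (by decide))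
  · exact pv_entry_eq (PySem.Dict.getD (PySem.Dict.mk sr) "comments" []) bc k "comments" hib (hpre "comments" (by decide))

-- A's whole pre-default list equals B's folded groups.
lemma pv_lists_eq (sr : List (String × List (Option String))) (bc : Nat)
    (hpre : ∀ field ∈ pvSpecialFields, PySem.Dict.getD (PySem.Dict.mk sr) field [] ≠ [] → bc ≤ (PySem.Dict.getD (PySem.Dict.mk sr) field []).length) :
    (PySem.List.pyRange 0 (bc : Int) 1).map (fun i =>
        (PySem.List.pyRange 0 ((pvSpecialFields.length : Int)) 1).filterMap (fun j =>
          match (PySem.List.pyGet? ((PySem.List.pyGet? (pvSpecialFields.map (fun field =>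
              let lst := PySem.Dict.getD (PySem.Dict.mk sr) field []
              if lst ≠ [] then lst.map (fun value => if Option.isSome value then value else (lst.find? (fun v => Option.isSome v)).getD none)
              else List.replicate bc none)) j).getD []) i).getD none with
          | some s => some (s, (PySem.List.pyGet? pvSpecialFields j).getD "")
          | none => none))
    = pvSpecialFields.foldl (pvFieldStep sr) (List.replicate bc []) := by
  apply List.ext_getElem?
  intro k
  by_cases hk : k < bc
  · rw [PySem.List.getElem?_map_pyRange_zero _ bc k hk]
    rw [pvFold_get?]
    rw [List.getElem?_replicate, if_pos hk]
    simp only [Option.map_some, List.nil_append]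
    rw [pv_row_eq sr bc k hk hpre]
  · rw [pvFold_get?, List.getElem?_replicate, if_neg hk]
    simp only [Option.map_none]
    apply List.getElem?_eq_none
    simp only [List.length_map, PySem.List.length_pyRange_one]
    omega

lemma pv_map_const_replicate (bc : Nat) (c : List (String × String)) :
    (PySem.List.pyRange 0 (bc : Int) 1).map (fun _ => c) = List.replicate bc c := by
  rw [PySem.List.pyRange_one, List.map_map]
  simp only [Function.comp_def]
  rw [List.map_const']
  simp

theorem generate_query_texts_fields_with_brand_check_spec : Claim_equal_generate_query_texts_fields_with_brand_check := by
  intro query _hdom hpre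
  unfold Spec_generate_query_texts_fields_with_brand_check
  simp only [generate_query_texts_fields_with_brand_check, generate_query_texts_fields_with_brand_check_alt]
  rw [pv_lists_eq (PySem.Dict.getD (PySem.Dict.mk query) "special_requirements" []) _ hpre]
  rw [pv_map_const_replicate]
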